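-- pv_equiv track=rewrite | github.com/jsueling/codility-python | count_non-divisible_optimal.py | solution
-- ===== SOURCE A (Python) =====
-- from collections import Counter
--
-- def solution(A):
--     N = len(A)
--     if N == 0:
--         return []
--     M = max(A)
--     counts = Counter(A)
--     divisor_counts = [0] * (M + 1)
--     for i in range(1, M + 1):
--         if counts[i] > 0:
--             for j in range(i, M + 1, i):
--                 divisor_counts[j] += counts[i]
--     result = []
--     for num in A:
--         non_divisors = N - divisor_counts[num]
--         result.append(non_divisors)
--     return result
-- ===== SOURCE B (Python) =====
-- # Same result as A on lists of non-negative ints; counts non-divisors by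
-- # per-element trial division up to isqrt (memoized per distinct value)
-- # instead of A's sieve over multiples.
-- import math
--
-- def solution(A):
--     N = len(A)
--     counts = {}
--     for x in A:
--         counts[x] = counts.get(x, 0) + 1
--     cache = {}
--     result = []
--     for num in A:
--         if num not in cache:
--             total = 0
--             for d in range(1, math.isqrt(num) + 1):
--                 if num % d == 0:
--                     total += counts.get(d, 0)
--                     q = num // d
--                     if q != d:
--                         total += counts.get(q, 0)
--             cache[num] = total
--         result.append(N - cache[num])
--     return result
-- ===== Notes on version B (the rewrite author's own statement) =====
-- stated objective: alternative
-- what changed: Replaces the mutable divisor_counts sieve over all multiples up to max(A) with per-element trial division up to isqrt(num) (paired divisors d and num//d), memoized per distinct value in a dict.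
-- outside the precondition, e.g. on solution([-1, 2]): A returns [1, 1], B raises ValueError; on solution([-1]): A raises IndexError, B raises ValueError
import Mathlib
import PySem

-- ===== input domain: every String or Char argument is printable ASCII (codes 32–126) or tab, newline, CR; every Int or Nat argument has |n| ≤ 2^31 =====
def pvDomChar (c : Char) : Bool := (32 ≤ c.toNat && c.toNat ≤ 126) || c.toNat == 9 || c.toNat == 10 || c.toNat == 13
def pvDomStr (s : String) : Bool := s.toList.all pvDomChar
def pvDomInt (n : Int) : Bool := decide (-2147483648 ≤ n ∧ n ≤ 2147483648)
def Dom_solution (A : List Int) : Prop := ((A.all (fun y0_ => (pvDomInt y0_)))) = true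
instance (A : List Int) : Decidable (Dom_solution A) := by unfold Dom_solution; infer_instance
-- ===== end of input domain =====

-- B replaces A's divisor_counts sieve over multiples with per-element trial division up to
-- isqrt (memoized per distinct value); equal return values on lists of non-negative ints.


-- ===== PORT A =====
def solution (A : List Int) : List Int :=
  let N : Int := (A.length : Int)
  if A.length = 0 then []
  else
    match PySem.List.max? A (fun x => x) with
    | none => []   -- unreachable: A is nonempty here
    | some M =>
      let counts : PySem.Dict Int Int := PySem.Dict.counter A
      let dc0 : List Int := List.replicate (M + 1).toNat 0   -- [0] * (M + 1)
      let dc : List Int :=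
        (PySem.List.pyRange 1 (M + 1) 1).foldl (fun dc i =>
          if counts.getD i 0 > 0 then
            (PySem.List.pyRange i (M + 1) i).foldl
              (fun dc j => PySem.List.pySetD dc j (PySem.List.pyGetD dc j 0 + counts.getD i 0)) dc
          else dc) dc0
      A.foldl (fun result num => result ++ [N - PySem.List.pyGetD dc num 0]) []

-- ===== PORT B =====
-- math.isqrt(num): exact for num ≥ 0 (every input Pre_ admits); Python raises ValueError on num < 0.
def pyIsqrt (num : Int) : Int := (Nat.sqrt num.toNat : Int)

-- the 'counts' dict built by Source B's first loop
def altCounts (A : List Int) : PySem.Dict Int Int :=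
  A.foldl (fun d x => d.insert x (d.getD x 0 + 1)) PySem.Dict.empty

-- Source B's inner trial-division loop computing 'total' for one num
def altTrial (counts : PySem.Dict Int Int) (num : Int) : Int :=
  (PySem.List.pyRange 1 (pyIsqrt num + 1) 1).foldl (fun total d =>
    if PySem.Int.mod num d = 0 then
      let total := total + counts.getD d 0
      let q := PySem.Int.floordiv num d
      if q ≠ d then total + counts.getD q 0 else total
    else total) 0

def solution_alt (A : List Int) : List Int :=
  let N : Int := (A.length : Int)
  let counts := altCounts A
  (A.foldl (fun (st : PySem.Dict Int Int × List Int) num =>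
      let cache := if st.1.contains num then st.1 else st.1.insert num (altTrial counts num)
      (cache, st.2 ++ [N - cache.getD num 0])) (PySem.Dict.empty, [])).2

-- ===== PRECONDITION & SPEC =====
-- Pre_ excludes lists containing a negative element: there A raises IndexError (all-negative
-- lists, or an element below -(max+1)) or else reads divisor_counts through Python's
-- negative-index wraparound, while B's math.isqrt raises ValueError on any negative element.
def Pre_solution (A : List Int) : Prop := ∀ x ∈ A, 0 ≤ x
instance (A : List Int) : Decidable (Pre_solution A) := by unfold Pre_solution; infer_instance

def pvWitness_solution : List Int := [0, 1, 2, 4, 4, 9]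

def Spec_solution (A : List Int) (out : List Int) : Prop := out = solution_alt A
instance (A : List Int) (out : List Int) : Decidable (Spec_solution A out) := by unfold Spec_solution; infer_instance

-- ===== CLAIM (what is proved, stated in full; the proofs are below) =====
def Claim_equal_solution : Prop := ∀ (A : List Int), Dom_solution A → Pre_solution A → Spec_solution A (solution A)

-- ===== LEMMAS AND PROOFS =====

-- occurrence count of v in A, as an Int
def cntI (A : List Int) (v : Int) : Int := (A.count v : Int)

-- the common reference value: sum of counts of all divisors of num in [1, num]
def dSum (A : List Int) (num : Int) : Int :=
  ((PySem.List.pyRange 1 (num + 1) 1).map (fun i => if i ∣ num then cntI A i else 0)).sum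

theorem nodup_pyRange_pos (a b : Int) {s : Int} (hs : 0 < s) : (PySem.List.pyRange a b s).Nodup := by
  rw [PySem.List.pyRange_of_pos a b hs]
  refine List.Nodup.map ?_ (List.nodup_range)
  intro x y hxy
  have : s * (x : Int) = s * (y : Int) := by linarith
  have := mul_left_cancel₀ (ne_of_gt hs) this
  exact_mod_cast this

-- effect of A's inner loop 'for j in range(i, M+1, i): divisor_counts[j] += counts[i]'
theorem inner_loop (c : Int) (L : List Int) (hnd : L.Nodup) :
    ∀ (dc : List Int), (∀ j ∈ L, 0 ≤ j ∧ j.toNat < dc.length) →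
      (L.foldl (fun dc j => PySem.List.pySetD dc j (PySem.List.pyGetD dc j 0 + c)) dc).length = dc.length
      ∧ ∀ k : Int, 0 ≤ k → k.toNat < dc.length →
          PySem.List.pyGetD (L.foldl (fun dc j => PySem.List.pySetD dc j (PySem.List.pyGetD dc j 0 + c)) dc) k 0
            = PySem.List.pyGetD dc k 0 + (if k ∈ L then c else 0) := by
  induction L with
  | nil => intro dc _; simp
  | cons j L ih =>
    intro dc hb
    obtain ⟨hj0, hjlen⟩ := hb j (List.mem_cons_self)
    have hnd' : L.Nodup := hnd.of_cons
    have hjL : j ∉ L := (List.nodup_cons.mp hnd).1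
    set dc' := PySem.List.pySetD dc j (PySem.List.pyGetD dc j 0 + c) with hdc'
    have hlen' : dc'.length = dc.length := PySem.List.length_pySetD dc j _
    obtain ⟨ihlen, ihget⟩ := ih hnd' dc' (fun x hx => by
      obtain ⟨h1, h2⟩ := hb x (List.mem_cons_of_mem _ hx); exact ⟨h1, by omega⟩)
    constructor
    · simpa [hlen'] using ihlen
    · intro k hk0 hklen
      have hsetget : PySem.List.pyGetD dc' k 0
          = if k.toNat = j.toNat then PySem.List.pyGetD dc j 0 + c else PySem.List.pyGetD dc k 0 := by
        rw [hdc']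
        rw [show j = ((j.toNat : Nat) : Int) by omega, show k = ((k.toNat : Nat) : Int) by omega]
        exact PySem.List.pyGetD_pySetD_natCast dc j.toNat k.toNat _ 0 (by omega)
      have := ihget k hk0 (by omega)
      simp only [List.foldl_cons]
      rw [← hdc', this, hsetget]
      by_cases hkj : k = j
      · subst hkj
        simp [hjL]
      · have : ¬ (k.toNat = j.toNat) := by omega
        simp [this, hkj, List.mem_cons]

-- effect of A's outer sieve loop over candidate divisors i
theorem outer_loop (counts : PySem.Dict Int Int) (M : Int) (is : List Int) :
    ∀ (dc : List Int), dc.length = (M + 1).toNat → (∀ i ∈ is, 1 ≤ i) →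
      (is.foldl (fun dc i =>
          if counts.getD i 0 > 0 then
            (PySem.List.pyRange i (M + 1) i).foldl
              (fun dc j => PySem.List.pySetD dc j (PySem.List.pyGetD dc j 0 + counts.getD i 0)) dc
          else dc) dc).length = dc.length
      ∧ ∀ k : Int, 0 ≤ k → k.toNat < dc.length →
          PySem.List.pyGetD (is.foldl (fun dc i =>
            if counts.getD i 0 > 0 then
              (PySem.List.pyRange i (M + 1) i).foldl
                (fun dc j => PySem.List.pySetD dc j (PySem.List.pyGetD dc j 0 + counts.getD i 0)) dc
            else dc) dc) k 0
          = PySem.List.pyGetD dc k 0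
            + (is.map (fun i => if counts.getD i 0 > 0 ∧ k ∈ PySem.List.pyRange i (M + 1) i then counts.getD i 0 else 0)).sum := by
  induction is with
  | nil => intro dc _ _; simp
  | cons i is ih =>
    intro dc hlen his
    have hi1 : 1 ≤ i := his i List.mem_cons_self
    have his' : ∀ x ∈ is, 1 ≤ x := fun x hx => his x (List.mem_cons_of_mem _ hx)
    simp only [List.foldl_cons, List.map_cons, List.sum_cons]
    by_cases hpos : counts.getD i 0 > 0
    · have hbnd : ∀ j ∈ PySem.List.pyRange i (M + 1) i, 0 ≤ j ∧ j.toNat < dc.length := by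
        intro j hj
        obtain ⟨h1, h2, -⟩ := (PySem.List.mem_pyRange_iff_of_pos (by omega) j).mp hj
        exact ⟨by omega, by omega⟩
      obtain ⟨hilen, higet⟩ :=
        inner_loop (counts.getD i 0) (PySem.List.pyRange i (M + 1) i) (nodup_pyRange_pos _ _ (by omega)) dc hbnd
      set dc' := (PySem.List.pyRange i (M + 1) i).foldl
          (fun dc j => PySem.List.pySetD dc j (PySem.List.pyGetD dc j 0 + counts.getD i 0)) dc with hdc'
      obtain ⟨ihlen, ihget⟩ := ih dc' (by omega) his'
      simp only [hpos, if_true]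
      constructor
      · omega
      · intro k hk0 hklen
        rw [ihget k hk0 (by omega), higet k hk0 hklen]
        simp only [true_and]
        ring
    · simp only [hpos, if_false, false_and]
      obtain ⟨ihlen, ihget⟩ := ih dc hlen his'
      refine ⟨ihlen, ?_⟩
      intro k hk0 hklen
      rw [ihget k hk0 hklen]
      simp

theorem pyGetD_replicate_zero (n : Nat) (k : Int) :
    PySem.List.pyGetD (List.replicate n (0 : Int)) k 0 = 0 := by
  unfold PySem.List.pyGetD
  cases h : PySem.List.pyGet? (List.replicate n (0 : Int)) k with
  | none => rfl
  | some x =>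
    have hx : x ∈ List.replicate n (0 : Int) := PySem.List.mem_of_pyGet?_eq_some _ h
    simp [List.eq_of_mem_replicate hx]

-- pairing small divisors d ≤ √m with their cofactors m/d
theorem nat_pair (m : Nat) (h : Nat → Int) :
    (∑ d ∈ Finset.Ico 1 (Nat.sqrt m + 1), if d ∣ m then h d + (if m / d ≠ d then h (m / d) else 0) else 0)
      = ∑ i ∈ Finset.Ico 1 (m + 1), if i ∣ m then h i else 0 := by
  rcases Nat.eq_zero_or_pos m with hm | hm
  · subst hm; simp
  have hmne : m ≠ 0 := Nat.pos_iff_ne_zero.mp hm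
  set r := Nat.sqrt m with hr
  have hIco : ∀ k : Nat, (Finset.Ico 1 (k + 1)).filter (· ∣ m) = m.divisors.filter (· ≤ k) := by
    intro k; ext d
    simp only [Finset.mem_filter, Finset.mem_Ico, Nat.mem_divisors]
    constructor
    · rintro ⟨⟨h1, h2⟩, h3⟩; exact ⟨⟨h3, hmne⟩, by omega⟩
    · rintro ⟨⟨h1, _⟩, h2⟩
      exact ⟨⟨Nat.pos_of_dvd_of_pos h1 hm, by omega⟩, h1⟩
  have hsq : r * r ≤ m := by have := Nat.sqrt_le' m; nlinarith [this]
  have hsq2 : m < (r + 1) * (r + 1) := by have := Nat.lt_succ_sqrt' m; nlinarith [this]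
  have hR : (∑ i ∈ Finset.Ico 1 (m + 1), if i ∣ m then h i else 0) = ∑ i ∈ m.divisors, h i := by
    rw [← Finset.sum_filter, hIco m, Finset.filter_true_of_mem]
    intro d hd
    exact Nat.le_of_dvd hm (Nat.mem_divisors.mp hd).1
  rw [hR, ← Finset.sum_filter, hIco r, Finset.sum_add_distrib,
      ← Finset.sum_filter_add_sum_filter_not m.divisors (· ≤ r) h]
  congr 1
  rw [← Finset.sum_filter]
  refine Finset.sum_nbij' (fun d => m / d) (fun e => m / e) ?_ ?_ ?_ ?_ ?_
  · intro d hd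
    simp only [Finset.mem_filter, Nat.mem_divisors] at hd ⊢
    obtain ⟨⟨⟨hdvd, -⟩, hdr⟩, hne⟩ := hd
    have hd0 : 0 < d := Nat.pos_of_dvd_of_pos hdvd hm
    have hmul : d * (m / d) = m := Nat.mul_div_cancel' hdvd
    have hq0 : 0 < m / d := Nat.div_pos (Nat.le_of_dvd hm hdvd) hd0
    refine ⟨⟨Nat.div_dvd_of_dvd hdvd, hmne⟩, ?_⟩
    intro hqr
    rcases Nat.lt_trichotomy d (m / d) with hlt | heq | hgt
    · nlinarith
    · exact hne heq.symm
    · nlinarith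
  · intro e he
    simp only [Finset.mem_filter, Nat.mem_divisors] at he ⊢
    obtain ⟨⟨hdvd, -⟩, her⟩ := he
    push Not at her
    have he0 : 0 < e := Nat.pos_of_dvd_of_pos hdvd hm
    have hmul : e * (m / e) = m := Nat.mul_div_cancel' hdvd
    have hback : m / (m / e) = e := Nat.div_div_self hdvd hmne
    have hqr : m / e ≤ r := by
      by_contra hc
      push Not at hc
      nlinarith
    have hq0 : 0 < m / e := Nat.div_pos (Nat.le_of_dvd hm hdvd) he0
    exact ⟨⟨⟨Nat.div_dvd_of_dvd hdvd, hmne⟩, hqr⟩, by omega⟩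
  · intro d hd
    simp only [Finset.mem_filter, Nat.mem_divisors] at hd
    exact Nat.div_div_self hd.1.1.1 hmne
  · intro e he
    simp only [Finset.mem_filter, Nat.mem_divisors] at he
    exact Nat.div_div_self he.1.1 hmne
  · intro d _; rfl

-- a list sum over range(1, k+1) is a Finset sum over Ico 1 (k+1)
theorem list_sum_Ico (k : Nat) (f : Int → Int) :
    ((PySem.List.pyRange 1 ((k : Int) + 1) 1).map f).sum = ∑ i ∈ Finset.Ico 1 (k + 1), f (i : Int) := by
  rw [PySem.List.pyRange_one, Finset.sum_Ico_eq_sum_range]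
  have h1 : ((k : Int) + 1 - 1).toNat = k := by omega
  rw [h1, List.map_map]
  have : (∑ t ∈ Finset.range (k + 1 - 1), f ((1 + t : Nat) : Int))
      = ((List.range (k + 1 - 1)).map (fun t => f ((1 + t : Nat) : Int))).sum := rfl
  rw [this]
  have h2 : k + 1 - 1 = k := by omega
  rw [h2]
  refine congrArg _ (List.map_congr_left ?_)
  intro t _
  simp only [Function.comp_apply]
  push_cast
  ring_nf

theorem trial_char (A : List Int) (num : Int) (h0 : 0 ≤ num) :
    altTrial (altCounts A) num = dSum A num := by
  have hc : ∀ v, (altCounts A).getD v 0 = cntI A v := by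
    intro v
    rw [altCounts, PySem.Dict.foldl_insert_getD_add_one_eq_counter, PySem.Dict.getD_counter]
    rfl
  set m := num.toNat with hm
  have hnum : num = (m : Int) := by omega
  have hbody : (fun (total d : Int) =>
      if PySem.Int.mod num d = 0 then
        let total := total + (altCounts A).getD d 0
        let q := PySem.Int.floordiv num d
        if q ≠ d then total + (altCounts A).getD q 0 else total
      else total)
      = fun total d => total + (if d ∣ num then
          cntI A d + (if PySem.Int.floordiv num d ≠ d then cntI A (PySem.Int.floordiv num d) else 0)
        else 0) := by
    funext total d
    simp only [PySem.Int.mod_eq_zero_iff_dvd, hc]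
    split_ifs <;> ring
  rw [altTrial, hbody, PySem.List.foldl_add, zero_add]
  rw [dSum, hnum]
  rw [show pyIsqrt ((m : Nat) : Int) = ((Nat.sqrt m : Nat) : Int) from by simp [pyIsqrt],
      list_sum_Ico, list_sum_Ico]
  have hconv : ∀ i : Nat,
      (if (i : Int) ∣ (m : Int) then
        cntI A i + (if PySem.Int.floordiv (m : Int) (i : Int) ≠ (i : Int) then
          cntI A (PySem.Int.floordiv (m : Int) (i : Int)) else 0) else 0)
      = (if i ∣ m then cntI A i + (if m / i ≠ i then cntI A ((m / i : Nat) : Int) else 0) else 0) := by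
    intro i
    rw [PySem.Int.floordiv_natCast]
    by_cases hd : i ∣ m
    · rw [if_pos (Int.natCast_dvd_natCast.mpr hd), if_pos hd]
      by_cases hne : m / i = i
      · rw [if_neg (by simp [hne]), if_neg (by simp [hne])]
      · rw [if_pos (by exact_mod_cast hne), if_pos hne]
    · rw [if_neg (fun hcon => hd (Int.natCast_dvd_natCast.mp hcon)), if_neg hd]
  have hconv2 : ∀ i : Nat, (if (i : Int) ∣ (m : Int) then cntI A (i : Int) else 0)
      = (if i ∣ m then cntI A (i : Int) else 0) := by
    intro i; simp [Int.natCast_dvd_natCast]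
  rw [Finset.sum_congr rfl (fun i _ => hconv i), Finset.sum_congr rfl (fun i _ => hconv2 i)]
  exact nat_pair m (fun t => cntI A (t : Int))

-- the dc entry A reads for num equals the divisor-count sum, for 0 ≤ num ≤ M
theorem sieve_char (A : List Int) (M : Int) (num : Int) (h0 : 0 ≤ num) (hnum : num ≤ M) :
    PySem.List.pyGetD
      ((PySem.List.pyRange 1 (M + 1) 1).foldl (fun dc i =>
          if (PySem.Dict.counter A).getD i 0 > 0 then
            (PySem.List.pyRange i (M + 1) i).foldl
              (fun dc j => PySem.List.pySetD dc j (PySem.List.pyGetD dc j 0 + (PySem.Dict.counter A).getD i 0)) dc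
          else dc) (List.replicate (M + 1).toNat 0)) num 0
      = dSum A num := by
  obtain ⟨hlen, hget⟩ := outer_loop (PySem.Dict.counter A) M (PySem.List.pyRange 1 (M + 1) 1)
    (List.replicate (M + 1).toNat 0) (by simp) (by
      intro i hi
      exact (PySem.List.mem_pyRange_one.mp hi).1)
  rw [hget num h0 (by simp; omega), pyGetD_replicate_zero, zero_add]
  have hstep : ∀ i ∈ PySem.List.pyRange 1 (M + 1) 1,
      (if (PySem.Dict.counter A).getD i 0 > 0 ∧ num ∈ PySem.List.pyRange i (M + 1) i
        then (PySem.Dict.counter A).getD i 0 else 0)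
      = (if i ∣ num ∧ i ≤ num then cntI A i else 0) := by
    intro i hi
    obtain ⟨hi1, hiM⟩ := PySem.List.mem_pyRange_one.mp hi
    rw [PySem.Dict.getD_counter]
    have hmem : num ∈ PySem.List.pyRange i (M + 1) i ↔ (i ∣ num ∧ i ≤ num) := by
      rw [PySem.List.mem_pyRange_iff_of_pos (by omega)]
      constructor
      · rintro ⟨ha, hb', hd⟩
        refine ⟨?_, ha⟩
        have := hd.add (dvd_refl i)
        simpa using this
      · rintro ⟨hd, hle⟩
        exact ⟨hle, by omega, dvd_sub hd (dvd_refl i)⟩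
    rcases Nat.eq_zero_or_pos (A.count i) with hz | hp
    · simp [hz, cntI]
    · have : ((A.count i : Int)) > 0 := by exact_mod_cast hp
      simp only [this, hmem, true_and, cntI]
  rw [List.map_congr_left hstep]
  rw [PySem.List.pyRange_one_append 1 (num + 1) (M + 1) (by omega) (by omega),
      List.map_append, List.sum_append]
  have hz : ((PySem.List.pyRange (num + 1) (M + 1) 1).map
      (fun i => if i ∣ num ∧ i ≤ num then cntI A i else 0)).sum = 0 := by
    apply List.sum_eq_zero
    intro x hx
    obtain ⟨f, hf, hfx⟩ := List.mem_map.mp hx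
    obtain ⟨h1, -⟩ := PySem.List.mem_pyRange_one.mp hf
    rw [← hfx]
    have : ¬ (f ≤ num) := by omega
    simp [this]
  rw [hz, add_zero, dSum]
  refine congrArg _ (List.map_congr_left ?_)
  intro i hi
  obtain ⟨h1, h2⟩ := PySem.List.mem_pyRange_one.mp hi
  have : i ≤ num := by omega
  simp [this]

-- Source B's memo loop appends N - trial(num) for every num, in order
theorem cache_loop (tr : Int → Int) (N : Int) (L : List Int) :
    ∀ (st : PySem.Dict Int Int × List Int),
      (∀ k v, st.1.get? k = some v → v = tr k) →
      (L.foldl (fun (st : PySem.Dict Int Int × List Int) num =>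
          let cache := if st.1.contains num then st.1 else st.1.insert num (tr num)
          (cache, st.2 ++ [N - cache.getD num 0])) st).2
        = st.2 ++ L.map (fun num => N - tr num) := by
  induction L with
  | nil => intro st _; simp
  | cons num L ih =>
    intro st hinv
    simp only [List.foldl_cons, List.map_cons]
    set cache := if st.1.contains num then st.1 else st.1.insert num (tr num) with hcache
    have hinv' : ∀ k v, cache.get? k = some v → v = tr k := by
      intro k v hkv
      rw [hcache] at hkv
      by_cases hcont : st.1.contains num
      · rw [if_pos hcont] at hkv; exact hinv k v hkv
      · rw [if_neg hcont, PySem.Dict.get?_insert] at hkv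
        by_cases hk : k = num
        · rw [if_pos hk] at hkv
          subst hk
          exact (Option.some_injective _ hkv).symm
        · rw [if_neg hk] at hkv; exact hinv k v hkv
    have hget : cache.getD num 0 = tr num := by
      rw [hcache]
      by_cases hcont : st.1.contains num
      · rw [if_pos hcont]
        have := PySem.Dict.contains_eq_isSome_get? st.1 num
        rw [hcont] at this
        obtain ⟨v, hv⟩ := Option.isSome_iff_exists.mp this.symm
        rw [PySem.Dict.getD_of_get?_eq_some _ _ hv, hinv num v hv]
      · rw [if_neg hcont, PySem.Dict.getD_insert_self]
    rw [ih (cache, st.2 ++ [N - cache.getD num 0]) hinv', hget]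
    simp

-- ===== VERDICT (by name: the statement is the Claim_ definition above) =====
theorem solution_spec : Claim_equal_solution := by
  intro A _ hpre
  unfold Spec_solution
  by_cases hA : A = []
  · subst hA; rfl
  · have hlen : ¬ (A.length = 0) := by simpa [List.length_eq_zero_iff] using hA
    cases hmax : PySem.List.max? A (fun x => x) with
    | none => exact absurd ((PySem.List.max?_eq_none_iff A _).mp hmax) hA
    | some M =>
      have hM0 : 0 ≤ M := hpre M (PySem.List.max?_mem hmax)
      have hub : ∀ y ∈ A, y ≤ M := PySem.List.max?_isMax hmax
      rw [solution, solution_alt]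
      simp only [hlen, if_false, hmax]
      rw [PySem.List.foldl_append_singleton_eq_map
        (fun num => (A.length : Int) - PySem.List.pyGetD _ num 0) A []]
      rw [cache_loop (altTrial (altCounts A)) (A.length : Int) A (PySem.Dict.empty, [])
        (by intro k v hkv; simp [PySem.Dict.get?_empty] at hkv)]
      simp only [List.nil_append]
      refine List.map_congr_left ?_
      intro num hnum
      have h0 : 0 ≤ num := hpre num hnum
      have hM : num ≤ M := hub num hnum
      rw [sieve_char A M num h0 hM, trial_char A num h0]
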